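-- pv_equiv track=rewrite | github.com/akermangeo/AlgebraicIntroductionToMathematicalLogic | lib.py | is_term
-- ===== SOURCE A (Python) =====
-- def is_term(term):
--     count = 1
--     for symbol in term:
--         if count == 0:
--              return False
--         if symbol == 'implies':
--             count += 1
--         else:
--             count -= 1
--     return count == 0
-- ===== SOURCE B (Python) =====
-- def is_term(term):
--     # Right-to-left postfix evaluation: scan the tokens in reverse, keeping a
--     # count s of completed subterms; 'implies' combines the top two.
--     s = 0
--     for tok in reversed(list(term)):
--         if tok == 'implies':
--             if s < 2:
--                 return False
--             s -= 1
--         else: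
--             s += 1
--     return s == 1
-- ===== Notes on version B (the rewrite author's own statement) =====
-- stated objective: alternative
-- what changed: Replaces A's left-to-right scan with an owed-subterm counter (count starts at 1, 'implies' adds one, anything else consumes one) by a right-to-left postfix evaluation: scanning the reversed token list, each atom pushes a completed subterm and each 'implies' combines the top two, accepting iff exactly one term remains.
import Mathlib
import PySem

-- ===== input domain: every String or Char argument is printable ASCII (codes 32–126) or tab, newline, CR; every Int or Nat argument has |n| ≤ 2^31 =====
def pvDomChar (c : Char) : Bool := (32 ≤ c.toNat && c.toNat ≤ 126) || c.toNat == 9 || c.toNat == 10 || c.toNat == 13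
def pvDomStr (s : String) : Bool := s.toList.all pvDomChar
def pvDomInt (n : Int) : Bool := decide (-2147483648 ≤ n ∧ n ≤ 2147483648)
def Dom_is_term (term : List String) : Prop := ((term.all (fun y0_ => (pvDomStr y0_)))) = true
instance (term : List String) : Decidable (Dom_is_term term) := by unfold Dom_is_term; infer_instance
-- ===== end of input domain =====

-- B replaces A's left-to-right owed-subterm counter by a right-to-left postfix
-- evaluation over the reversed token list (objective: alternative, same cost).

-- ===== PORT A =====
-- A's for-loop with early return: count of owed subterms, left to right.
def is_term_loopA : List String → Int → Bool
  | [], count => count == 0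
  | symbol :: rest, count =>
      if count == 0 then false
      else if symbol == "implies" then is_term_loopA rest (count + 1)
      else is_term_loopA rest (count - 1)

def is_term (term : List String) : Bool := is_term_loopA term 1

-- ===== PORT B =====
-- B's for-loop over reversed(term): stack size s of completed subterms;
-- none = the early `return False` when 'implies' finds fewer than two operands.
def is_term_loopB : List String → Int → Option Int
  | [], s => some s
  | tok :: rest, s =>
      if tok == "implies" then
        if s < 2 then none else is_term_loopB rest (s - 1)
      else is_term_loopB rest (s + 1)

def is_term_alt (term : List String) : Bool :=
  match is_term_loopB term.reverse 0 with
  | none => false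
  | some s => s == 1

-- ===== PRECONDITION & SPEC =====
def Spec_is_term (term : List String) (out : Bool) : Prop := out = is_term_alt term
instance (term : List String) (out : Bool) : Decidable (Spec_is_term term out) := by unfold Spec_is_term; infer_instance

-- ===== CLAIM (what is proved, stated in full; the proofs are below) =====
def Claim_equal_is_term : Prop := ∀ (term : List String), Dom_is_term term → Spec_is_term term (is_term term)

-- ===== LEMMAS AND PROOFS =====

theorem loopB_append (r1 r2 : List String) (s : Int) :
    is_term_loopB (r1 ++ r2) s =
      (match is_term_loopB r1 s with
        | none => none
        | some s' => is_term_loopB r2 s') := by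
  induction r1 generalizing s with
  | nil => simp [is_term_loopB]
  | cons x t ih =>
      simp only [List.cons_append, is_term_loopB]
      split_ifs <;> simp [ih]

theorem loopB_nonneg (r : List String) (s₀ s : Int) (h0 : 0 ≤ s₀)
    (h : is_term_loopB r s₀ = some s) : 0 ≤ s := by
  induction r generalizing s₀ with
  | nil => simp [is_term_loopB] at h; omega
  | cons x t ih =>
      simp only [is_term_loopB] at h
      split_ifs at h with h1 h2
      · exact ih (s₀ - 1) (by omega) h
      · exact ih (s₀ + 1) (by omega) h

theorem loopA_iff_loopB (l : List String) (c : Int) (hc : 0 ≤ c) :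
    is_term_loopA l c = true ↔ is_term_loopB l.reverse 0 = some c := by
  induction l generalizing c with
  | nil =>
      simp only [is_term_loopA, List.reverse_nil, is_term_loopB, beq_iff_eq, Option.some.injEq]
      omega
  | cons x t ih =>
      rw [show (x :: t).reverse = t.reverse ++ [x] from by simp, loopB_append]
      simp only [is_term_loopA]
      cases hr : is_term_loopB t.reverse 0 with
      | none =>
          by_cases hc0 : c = 0
          · simp [hc0]
          · by_cases hx : x = "implies"
            · rw [if_neg (by simp [hc0]), if_pos (by simp [hx])]
              simp [ih (c + 1) (by omega), hr]
            · rw [if_neg (by simp [hc0]), if_neg (by simp [hx])]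
              simp [ih (c - 1) (by omega), hr]
      | some s =>
          have hs : 0 ≤ s := loopB_nonneg _ 0 s (by omega) hr
          by_cases hc0 : c = 0
          · rw [if_pos (by simp [hc0])]
            by_cases hx : x = "implies"
            · simp only [is_term_loopB, if_pos (by simp [hx] : (x == "implies") = true)]
              by_cases h4 : s < 2
              · simp [h4]
              · rw [if_neg h4]
                simp only [Bool.false_eq_true, false_iff, Option.some.injEq]
                omega
            · simp only [is_term_loopB, if_neg (by simp [hx] : ¬ (x == "implies") = true)]
              simp only [Bool.false_eq_true, false_iff, Option.some.injEq]
              omega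
          · rw [if_neg (by simp [hc0])]
            by_cases hx : x = "implies"
            · rw [if_pos (by simp [hx])]
              rw [ih (c + 1) (by omega), hr]
              simp only [is_term_loopB, if_pos (by simp [hx] : (x == "implies") = true)]
              by_cases h4 : s < 2
              · rw [if_pos h4]
                simp only [Option.some.injEq]
                constructor
                · intro h; omega
                · intro h; cases h
              · rw [if_neg h4]
                simp only [Option.some.injEq]
                omega
            · rw [if_neg (by simp [hx])]
              rw [ih (c - 1) (by omega), hr]
              simp only [is_term_loopB, if_neg (by simp [hx] : ¬ (x == "implies") = true)]
              simp only [Option.some.injEq]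
              omega

-- ===== VERDICT (by name: the statement is the Claim_ definition above) =====
theorem is_term_spec : Claim_equal_is_term := by
  intro term _
  unfold Spec_is_term is_term is_term_alt
  rw [Bool.eq_iff_iff, loopA_iff_loopB term 1 (by omega)]
  cases hr : is_term_loopB term.reverse 0 with
  | none => simp
  | some s =>
      simp only [Option.some.injEq, beq_iff_eq]
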